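-- pv_equiv track=rewrite | github.com/HuynhTriNhan/MONICE | MONICE_experiments/binary/dice_ml_x/explainer_interfaces/dice_pytorch.py | _get_ohe_groups
-- ===== SOURCE A (Python) =====
-- from collections import OrderedDict, defaultdict
--
-- def _get_ohe_groups(cat_col_names: list[str], ohe_col_names: list[str]):
--     groups = defaultdict(list)
--
--     for i, col in enumerate(ohe_col_names):
--         for cat in cat_col_names:
--             if col.startswith(cat + "_"):
--                 groups[cat].append(i)
--                 break
--     return [groups[c] for c in cat_col_names]
-- ===== SOURCE B (Python) =====
-- def _get_ohe_groups(cat_col_names: list[str], ohe_col_names: list[str]):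
--     # Index each category name by its first position; for each ohe column look at
--     # its underscore-cut prefixes and pick the matching category of minimal position.
--     idx = {}
--     for k, c in enumerate(cat_col_names):
--         if c not in idx:
--             idx[c] = k
--     groups = {}
--     for i, col in enumerate(ohe_col_names):
--         best = None
--         for j in range(len(col)):
--             if col[j] == "_":
--                 p = idx.get(col[:j])
--                 if p is not None and (best is None or p < best[0]):
--                     best = (p, col[:j])
--         if best is not None:
--             groups[best[1]] = groups.get(best[1], []) + [i]
--     return [groups.get(c, []) for c in cat_col_names]
-- ===== Notes on version B (the rewrite author's own statement) =====
-- stated objective: faster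
-- what changed: A scans every category name for each one-hot column (startswith test per pair); B indexes category names in a dict once and, per column, looks up only the column's underscore-cut prefixes, keeping the match of minimal category position.
import Mathlib
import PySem

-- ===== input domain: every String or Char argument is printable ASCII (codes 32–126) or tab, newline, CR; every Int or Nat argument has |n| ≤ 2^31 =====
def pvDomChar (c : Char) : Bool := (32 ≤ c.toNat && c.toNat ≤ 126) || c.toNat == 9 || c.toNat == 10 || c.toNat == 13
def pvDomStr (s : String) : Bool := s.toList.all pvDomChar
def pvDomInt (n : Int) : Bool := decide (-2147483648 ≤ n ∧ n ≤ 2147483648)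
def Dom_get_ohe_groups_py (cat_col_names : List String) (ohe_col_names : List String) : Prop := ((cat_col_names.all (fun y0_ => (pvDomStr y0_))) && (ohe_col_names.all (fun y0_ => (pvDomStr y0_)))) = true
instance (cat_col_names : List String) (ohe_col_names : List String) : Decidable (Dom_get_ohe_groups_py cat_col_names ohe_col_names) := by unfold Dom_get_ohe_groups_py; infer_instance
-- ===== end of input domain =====

-- B replaces A's inner scan over all category names by dict lookups of the column's
-- underscore-cut prefixes (category indexed once in a dict); measured-speed claim per check.

-- ===== PORT A =====
-- inner `for cat in cat_col_names: if col.startswith(cat + "_"): groups[cat].append(i); break`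
def pvAInner (col : String) (i : Int) : List String → PySem.Dict String (List Int) → PySem.Dict String (List Int)
  | [], g => g
  | cat :: rest, g =>
      if PySem.Str.startswith col (cat ++ "_") then g.modify cat [] (· ++ [i])
      else pvAInner col i rest g

def get_ohe_groups_py (cat_col_names : List String) (ohe_col_names : List String) : List (List Int) :=
  let groups := (PySem.List.enumerate ohe_col_names 0).foldl
      (fun g p => pvAInner p.2 p.1 cat_col_names g) PySem.Dict.empty
  cat_col_names.map (fun c => groups.getD c [])

-- ===== PORT B =====
-- best-candidate scan over `for j in range(len(col))` from Source B
def pvBBest (idx : PySem.Dict String Int) (col : String) : Option (Int × String) :=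
  (PySem.List.pyRange 0 (PySem.Str.len col) 1).foldl
    (fun best j =>
      if PySem.Str.pyGet? col j = some '_' then
        match idx.get? (PySem.Str.slice col none (some j)) with
        | some q =>
          match best with
          | none => some (q, PySem.Str.slice col none (some j))
          | some b => if q < b.1 then some (q, PySem.Str.slice col none (some j)) else some b
        | none => best
      else best) none

def get_ohe_groups_py_alt (cat_col_names : List String) (ohe_col_names : List String) : List (List Int) :=
  let idx : PySem.Dict String Int := (PySem.List.enumerate cat_col_names 0).foldl
      (fun d p => if d.contains p.2 then d else d.insert p.2 p.1) PySem.Dict.empty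
  let groups := (PySem.List.enumerate ohe_col_names 0).foldl
      (fun g p =>
        match pvBBest idx p.2 with
        | some b => g.insert b.2 ((g.getD b.2 []) ++ [p.1])
        | none => g) PySem.Dict.empty
  cat_col_names.map (fun c => groups.getD c [])

-- ===== PRECONDITION & SPEC =====
def Spec_get_ohe_groups_py (cat_col_names : List String) (ohe_col_names : List String) (out : List (List Int)) : Prop := out = get_ohe_groups_py_alt cat_col_names ohe_col_names
instance (cat_col_names : List String) (ohe_col_names : List String) (out : List (List Int)) : Decidable (Spec_get_ohe_groups_py cat_col_names ohe_col_names out) := by unfold Spec_get_ohe_groups_py; infer_instance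

-- ===== CLAIM (what is proved, stated in full; the proofs are below) =====
def Claim_equal_get_ohe_groups_py : Prop := ∀ (cat_col_names : List String) (ohe_col_names : List String), Dom_get_ohe_groups_py cat_col_names ohe_col_names → Spec_get_ohe_groups_py cat_col_names ohe_col_names (get_ohe_groups_py cat_col_names ohe_col_names)

-- ===== LEMMAS AND PROOFS =====

-- first index of c in cats (proof-side helper)
def pvFirstIdx (c : String) : List String → Option Nat
  | [] => none
  | x :: xs => if x = c then some 0 else (pvFirstIdx c xs).map (· + 1)

-- the matching predicate of A's inner loop
def pvMatch (col cat : String) : Bool := PySem.Str.startswith col (cat ++ "_")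

-- A's inner loop = first match, appended
theorem pvAInner_eq (col : String) (i : Int) (cats : List String) (g : PySem.Dict String (List Int)) :
    pvAInner col i cats g
      = match cats.find? (pvMatch col) with
        | some cat => g.insert cat ((g.getD cat []) ++ [i])
        | none => g := by
  induction cats with
  | nil => simp [pvAInner, List.find?]
  | cons cat rest ih =>
      by_cases h : PySem.Str.startswith col (cat ++ "_") = true
      · rw [List.find?_cons_of_pos (by simp only [pvMatch]; exact h)]
        simp only [pvAInner, if_pos h]
        rfl
      · rw [List.find?_cons_of_neg (by simp only [pvMatch]; exact h)]
        simp only [pvAInner, if_neg h, ih]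

-- idx dict characterization
theorem pvIdx_get (cats : List String) (s : Int) (d : PySem.Dict String Int) (c : String) :
    (((PySem.List.enumerate cats s).foldl
        (fun d p => if d.contains p.2 then d else d.insert p.2 p.1) d).get? c)
      = ((d.get? c).orElse (fun _ => (pvFirstIdx c cats).map (fun k => s + (k : Int)))) := by
  induction cats generalizing s d with
  | nil =>
      cases h : d.get? c <;> simp [pvFirstIdx, h, Option.orElse]
  | cons x xs ih =>
      rw [PySem.List.enumerate_cons]
      simp only [List.foldl_cons]
      by_cases hx : x = c
      · subst hx
        by_cases hc : d.contains x = true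
        · rw [if_pos hc, ih]
          have hs : (d.get? x).isSome := by
            rw [← PySem.Dict.contains_eq_isSome_get?]; exact hc
          obtain ⟨v, hv⟩ := Option.isSome_iff_exists.mp hs
          simp [pvFirstIdx, hv, Option.orElse]
        · rw [if_neg hc, ih]
          have hnone : d.get? x = none := by
            have := PySem.Dict.contains_eq_isSome_get? d x
            cases h' : d.get? x
            · rfl
            · rw [h'] at this; simp at this; exact absurd this hc
          have hins : (d.insert x s).get? x = some s := PySem.Dict.get?_insert_self d x s
          simp [pvFirstIdx, hnone, hins, Option.orElse]
      · have hne : c ≠ x := fun h => hx h.symm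
        have htail : ∀ (o : Option Int),
            (o.orElse (fun _ => (pvFirstIdx c xs).map (fun k => (s + 1) + (k : Int))))
              = (o.orElse (fun _ => (pvFirstIdx c (x :: xs)).map (fun k => s + (k : Int)))) := by
          intro o
          cases o <;> cases hF : pvFirstIdx c xs <;>
            simp [pvFirstIdx, hx, hF, Option.orElse] <;> push_cast <;> ring
        by_cases hc : d.contains x = true
        · rw [if_pos hc, ih]
          exact htail _
        · rw [if_neg hc, ih,
              PySem.Dict.get?_insert_of_ne d s hne]
          exact htail _

-- pvFirstIdx facts
theorem pvFirstIdx_spec (c : String) (cats : List String) (k : Nat)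
    (h : pvFirstIdx c cats = some k) :
    cats[k]? = some c ∧ ∀ m < k, cats[m]? ≠ some c := by
  induction cats generalizing k with
  | nil => simp [pvFirstIdx] at h
  | cons x xs ih =>
      by_cases hx : x = c
      · simp [pvFirstIdx, hx] at h
        subst h
        simp [hx]
      · simp only [pvFirstIdx, if_neg hx] at h
        obtain ⟨k', hk', rfl⟩ := Option.map_eq_some_iff.mp h
        obtain ⟨h1, h2⟩ := ih k' hk'
        refine ⟨by simpa using h1, ?_⟩
        intro m hm
        cases m with
        | zero => simpa using hx
        | succ m' => simpa using h2 m' (by omega)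

theorem pvFirstIdx_isSome (c : String) (cats : List String) (h : c ∈ cats) :
    ∃ k, pvFirstIdx c cats = some k := by
  induction cats with
  | nil => simp at h
  | cons x xs ih =>
      by_cases hx : x = c
      · exact ⟨0, by simp [pvFirstIdx, hx]⟩
      · obtain ⟨k, hk⟩ := ih (by
          rcases List.mem_cons.mp h with h' | h'
          · exact absurd h'.symm hx
          · exact h')
        exact ⟨k + 1, by simp [pvFirstIdx, hx, hk]⟩

theorem pvFirstIdx_mem (c : String) (cats : List String) (k : Nat)
    (h : pvFirstIdx c cats = some k) : c ∈ cats := by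
  have := (pvFirstIdx_spec c cats k h).1
  exact List.mem_of_getElem? this

-- merge step of the best-candidate fold
def pvMerge (best : Option (Int × String)) (o : Option (Int × String)) : Option (Int × String) :=
  match o with
  | none => best
  | some c =>
    match best with
    | none => some c
    | some b => if c.1 < b.1 then some c else some b

theorem pvMerge_none_iff (l : List (Option (Int × String))) (acc : Option (Int × String)) :
    l.foldl pvMerge acc = none ↔ (acc = none ∧ l.filterMap id = []) := by
  induction l generalizing acc with
  | nil => simp
  | cons o l ih =>
      cases o with
      | none => simp [pvMerge, ih]
      | some c =>
          cases acc with
          | none => simp [pvMerge, ih]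
          | some b => by_cases hq : c.1 < b.1 <;> simp [pvMerge, hq, ih]

theorem pvMerge_mem (l : List (Option (Int × String))) (acc : Option (Int × String))
    (b : Int × String) (h : l.foldl pvMerge acc = some b) :
    some b = acc ∨ b ∈ l.filterMap id := by
  induction l generalizing acc with
  | nil => simp only [List.foldl_nil] at h; exact Or.inl h.symm
  | cons o l ih =>
      simp only [List.foldl_cons] at h
      rcases ih _ h with h' | h'
      · cases o with
        | none => exact Or.inl (by simpa [pvMerge] using h')
        | some c =>
            cases acc with
            | none =>
                right
                simp [pvMerge] at h'
                simp [h']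
            | some a =>
                by_cases hq : c.1 < a.1
                · right
                  simp [pvMerge, hq] at h'
                  simp [h']
                · left
                  simp [pvMerge, hq] at h'
                  simp [h']
      · right
        have h'' : some b ∈ l := by simpa using h'
        cases o <;> simp [h'']

theorem pvMerge_min (l : List (Option (Int × String))) (acc : Option (Int × String))
    (b : Int × String) (h : l.foldl pvMerge acc = some b) :
    (∀ a, acc = some a → b.1 ≤ a.1) ∧ (∀ c ∈ l.filterMap id, b.1 ≤ c.1) := by
  induction l generalizing acc with
  | nil =>
      simp only [List.foldl_nil] at h
      subst h
      exact ⟨fun a ha => by simp at ha; simp [ha], by simp⟩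
  | cons o l ih =>
      simp only [List.foldl_cons] at h
      obtain ⟨ha, hl⟩ := ih _ h
      cases o with
      | none =>
          refine ⟨fun a hacc => ha a (by simpa [pvMerge] using hacc), ?_⟩
          intro x hx
          exact hl x (by simpa using hx)
      | some c =>
          cases acc with
          | none =>
              refine ⟨by simp, ?_⟩
              have hbc : b.1 ≤ c.1 := ha c (by simp [pvMerge])
              intro x hx
              rcases (by simpa using hx : x = c ∨ some x ∈ l) with rfl | hx'
              · exact hbc
              · exact hl x (by simpa using hx')
          | some a =>
              by_cases hq : c.1 < a.1
              · have hbc : b.1 ≤ c.1 := ha c (by simp [pvMerge, hq])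
                refine ⟨fun a' ha' => ?_, ?_⟩
                · cases ha'
                  exact le_of_lt (lt_of_le_of_lt hbc hq)
                · intro x hx
                  rcases (by simpa using hx : x = c ∨ some x ∈ l) with rfl | hx'
                  · exact hbc
                  · exact hl x (by simpa using hx')
              · have hba : b.1 ≤ a.1 := ha a (by simp [pvMerge, hq])
                refine ⟨fun a' ha' => ?_, ?_⟩
                · cases ha'
                  exact hba
                · intro x hx
                  rcases (by simpa using hx : x = c ∨ some x ∈ l) with rfl | hx'
                  · exact le_trans hba (le_of_not_gt hq)
                  · exact hl x (by simpa using hx')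

-- the candidate at position j of col
def pvCand (idx : PySem.Dict String Int) (cs : List Char) (j : Nat) : Option (Int × String) :=
  if cs[j]? = some '_' then
    (idx.get? (String.ofList (cs.take j))).map (fun q => (q, String.ofList (cs.take j)))
  else none

theorem pvBBest_eq_foldl (idx : PySem.Dict String Int) (col : String) :
    pvBBest idx col
      = ((List.range col.toList.length).map (pvCand idx col.toList)).foldl pvMerge none := by
  unfold pvBBest
  have hlen : PySem.Str.len col = (col.toList.length : Int) := by simp
  rw [hlen, PySem.List.pyRange_zero_natCast, List.foldl_map, List.foldl_map]
  apply List.foldl_ext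
  intro best j hj
  have hslice : PySem.Str.slice col none (some (j : Int)) = String.ofList (col.toList.take j) := by
    have h1 := PySem.Str.toList_slice col none (some (j : Int))
    rw [PySem.Chars.slice_eq_listSlice, PySem.List.slice_to_natCast] at h1
    rw [← h1]
    exact String.ofList_toList.symm
  have hget : PySem.Str.pyGet? col ((j : Nat) : Int) = col.toList[j]? := by simp
  rw [hget, hslice]
  unfold pvCand
  by_cases hc : col.toList[j]? = some '_'
  · rw [if_pos hc, if_pos hc]
    cases idx.get? (String.ofList (col.toList.take j)) <;> cases best <;> simp [pvMerge]
  · rw [if_neg hc, if_neg hc]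
    simp [pvMerge]

-- a candidate is a match that is in idx
theorem pvCand_match (idx : PySem.Dict String Int) (cs : List Char) (j : Nat)
    (q : Int) (s : String) (h : pvCand idx cs (j : Nat) = some (q, s)) :
    idx.get? s = some q ∧ pvMatch (String.ofList cs) s = true := by
  unfold pvCand at h
  by_cases hc : cs[j]? = some '_'
  · rw [if_pos hc] at h
    obtain ⟨q', hq', heq⟩ := Option.map_eq_some_iff.mp h
    injection heq with h1 h2
    subst h1; subst h2
    refine ⟨hq', ?_⟩
    have hj : j < cs.length := by
      have := List.getElem?_eq_some_iff.mp hc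
      exact this.1
    have htake : cs.take (j + 1) = cs.take j ++ ['_'] := by
      rw [List.take_succ, hc]
      rfl
    simp only [pvMatch, PySem.Str.startswith_eq, String.toList_append, String.toList_ofList]
    rw [PySem.Chars.startswith_iff]
    have : cs.take j ++ "_".toList = cs.take (j + 1) := by
      rw [htake]
      rfl
    rw [this]
    exact List.take_prefix _ _
  · rw [if_neg hc] at h
    simp at h
  

-- any match of col yields a candidate position
theorem pvMatch_cand (idx : PySem.Dict String Int) (cs : List Char) (cat : String)
    (hm : pvMatch (String.ofList cs) cat = true) :
    cat.toList.length < cs.length ∧ pvCand idx cs cat.toList.length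
      = (idx.get? cat).map (fun q => (q, cat)) := by
  have hpre : cat.toList ++ ['_'] <+: cs := by
    have := hm
    simp only [pvMatch, PySem.Str.startswith_eq, String.toList_append, String.toList_ofList] at this
    rw [PySem.Chars.startswith_iff] at this
    simpa using this
  obtain ⟨t, ht⟩ := hpre
  have ht' : cs = cat.toList ++ '_' :: t := by rw [← ht]; simp
  have hlen : cat.toList.length < cs.length := by
    rw [ht']
    simp
  have hcj : cs[cat.toList.length]? = some '_' := by
    rw [ht']
    rw [List.getElem?_append_right (le_refl _)]
    simp
  have htake : cs.take cat.toList.length = cat.toList := by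
    rw [ht']
    simp
  refine ⟨hlen, ?_⟩
  unfold pvCand
  rw [if_pos hcj, htake, String.ofList_toList]
  

-- the key name-level equality: B's best choice names A's first match
theorem pvBest_name (cats : List String) (col : String) :
    (pvBBest ((PySem.List.enumerate cats 0).foldl
        (fun d p => if d.contains p.2 then d else d.insert p.2 p.1) PySem.Dict.empty) col).map (·.2)
      = cats.find? (pvMatch col) := by
  set idx := (PySem.List.enumerate cats 0).foldl
      (fun d p => if d.contains p.2 then d else d.insert p.2 p.1) PySem.Dict.empty with hidxdef
  have hidx : ∀ c, idx.get? c = (pvFirstIdx c cats).map (fun k : Nat => (k : Int)) := by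
    intro c
    rw [hidxdef, pvIdx_get]
    cases hF : pvFirstIdx c cats <;> simp [Option.orElse]
  rw [pvBBest_eq_foldl]
  set L := (List.range col.toList.length).map (pvCand idx col.toList) with hL
  have hofl : String.ofList col.toList = col := String.ofList_toList
  cases hf : cats.find? (pvMatch col) with
  | none =>
      have hnone : L.foldl pvMerge none = none := by
        refine (pvMerge_none_iff L none).mpr ⟨rfl, ?_⟩
        rw [List.filterMap_eq_nil_iff]
        intro o ho
        obtain ⟨j, hj, rfl⟩ := List.mem_map.mp ho
        cases hcnd : pvCand idx col.toList j with
        | none => rfl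
        | some b =>
            exfalso
            obtain ⟨hg, hmb⟩ := pvCand_match idx col.toList j b.1 b.2 (by rw [← hcnd])
            rw [hofl] at hmb
            have h2 : (pvFirstIdx b.2 cats).map (fun k : Nat => (k : Int)) = some b.1 :=
              (hidx b.2).symm.trans hg
            obtain ⟨kb, hkb, -⟩ := Option.map_eq_some_iff.mp h2
            have hbmem : b.2 ∈ cats := pvFirstIdx_mem b.2 cats kb hkb
            exact absurd hmb (by simpa using List.find?_eq_none.mp hf b.2 hbmem)
      rw [hnone]
      simp
  | some cat₀ =>
      obtain ⟨hm₀, as, bs, hcats, hprefix⟩ := List.find?_eq_some_iff_append.mp hf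
      have hmem₀ : cat₀ ∈ cats := by rw [hcats]; simp
      obtain ⟨p₀, hp₀⟩ := pvFirstIdx_isSome cat₀ cats hmem₀
      have hspec₀ := pvFirstIdx_spec cat₀ cats p₀ hp₀
      have hk₀ : cats[as.length]? = some cat₀ := by
        rw [hcats, List.getElem?_append_right (le_refl _)]
        simp
      have hple : p₀ ≤ as.length := by
        by_contra hcon
        push_neg at hcon
        exact hspec₀.2 as.length hcon hk₀
      obtain ⟨hjlt, hcand⟩ := pvMatch_cand idx col.toList cat₀ (by rw [hofl]; exact hm₀)
      have hidxcat : idx.get? cat₀ = some ((p₀ : Int)) := by rw [hidx, hp₀]; rfl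
      have hfj : pvCand idx col.toList cat₀.toList.length = some (((p₀ : Int)), cat₀) := by
        rw [hcand, hidxcat]
        rfl
      have hmemL : some (((p₀ : Int)), cat₀) ∈ L := by
        rw [hL]
        exact List.mem_map.mpr ⟨cat₀.toList.length, List.mem_range.mpr hjlt, hfj⟩
      have hmemF : (((p₀ : Int)), cat₀) ∈ L.filterMap id :=
        List.mem_filterMap.mpr ⟨some (((p₀ : Int)), cat₀), hmemL, rfl⟩
      cases hres : L.foldl pvMerge none with
      | none =>
          exfalso
          obtain ⟨-, hnil⟩ := (pvMerge_none_iff L none).mp hres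
          rw [hnil] at hmemF
          simp at hmemF
      | some b =>
          have hmem := pvMerge_mem L none b hres
          have hbF : b ∈ L.filterMap id := by
            rcases hmem with h' | h'
            · exact absurd h'.symm (by simp)
            · exact h'
          have hbp : b.1 ≤ (p₀ : Int) := (pvMerge_min L none b hres).2 _ hmemF
          obtain ⟨o, hoL, hob⟩ := List.mem_filterMap.mp hbF
          obtain ⟨j, hj, hcj⟩ := List.mem_map.mp hoL
          have hcb : pvCand idx col.toList j = some b := by rw [hcj]; exact hob
          obtain ⟨hg, hmb⟩ := pvCand_match idx col.toList j b.1 b.2 (by rw [hcb])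
          rw [hofl] at hmb
          have h2 : (pvFirstIdx b.2 cats).map (fun k : Nat => (k : Int)) = some b.1 :=
            (hidx b.2).symm.trans hg
          obtain ⟨kb, hkb, hkbv⟩ := Option.map_eq_some_iff.mp h2
          have hspecb := pvFirstIdx_spec b.2 cats kb hkb
          have hkas : as.length ≤ kb := by
            by_contra hcon
            push_neg at hcon
            have : as[kb]? = some b.2 := by
              have h1 := hspecb.1
              rw [hcats, List.getElem?_append, if_pos hcon] at h1
              exact h1
            have : b.2 ∈ as := List.mem_of_getElem? this
            have := hprefix b.2 this
            simp [hmb] at this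
          have hkp : (kb : Int) ≤ (p₀ : Int) := hkbv ▸ hbp
          have hkeq : kb = as.length := by
            have h3 : (kb : Int) ≤ (as.length : Int) := le_trans hkp (by exact_mod_cast hple)
            omega
          have hb2 : b.2 = cat₀ := by
            have h1 := hspecb.1
            rw [hkeq, hk₀] at h1
            exact (Option.some_inj.mp h1).symm
          simp [hb2]

-- ===== VERDICT (by name: the statement is the Claim_ definition above) =====
theorem get_ohe_groups_py_spec : Claim_equal_get_ohe_groups_py := by
  intro cats ohes _
  show get_ohe_groups_py cats ohes = get_ohe_groups_py_alt cats ohes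
  unfold get_ohe_groups_py get_ohe_groups_py_alt
  have h : (PySem.List.enumerate ohes 0).foldl
        (fun g p => pvAInner p.2 p.1 cats g) PySem.Dict.empty
      = (PySem.List.enumerate ohes 0).foldl
        (fun g p =>
          match pvBBest ((PySem.List.enumerate cats 0).foldl
              (fun d p => if d.contains p.2 then d else d.insert p.2 p.1)
              PySem.Dict.empty) p.2 with
          | some b => g.insert b.2 ((g.getD b.2 []) ++ [p.1])
          | none => g) PySem.Dict.empty := by
    apply List.foldl_ext
    intro g p hp
    rw [pvAInner_eq, ← pvBest_name cats p.2]
    cases hb : pvBBest ((PySem.List.enumerate cats 0).foldl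
        (fun d p => if d.contains p.2 then d else d.insert p.2 p.1)
        PySem.Dict.empty) p.2 <;> simp
  rw [h]
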